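-- pv_equiv track=rewrite | github.com/beckerrh/FiniteDifferences | tools.py | indsAndShifts
-- ===== SOURCE A (Python) =====
-- def indsAndShifts(dim =3, k=2):
--     s0 = [-1, 1]
--     s=[]
--     ind =[]
--     if k==1:
--         for i0 in range(dim):
--             ind.append([i0])
--         for i0 in s0:
--             s.append([i0])
--     elif k==2:
--         for i0 in range(dim):
--             for i1 in range(i0+1,dim):
--                     ind.append([i0,i1])
--         for i0 in s0:
--             for i1 in s0:
--                 s.append([i0, i1])
--     elif k==3:
--         for i0 in range(dim):
--             for i1 in range(i0+1,dim):
--                 for i2 in range(i1 + 1, dim):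
--                     ind.append([i0,i1,i2])
--         for i0 in s0:
--             for i1 in s0:
--                 for i2 in s0:
--                     s.append([i0,i1,i2])
--     elif k==4:
--         for i0 in range(dim):
--             for i1 in range(i0+1,dim):
--                 for i2 in range(i1 + 1, dim):
--                     for i3 in range(i2 + 1, dim):
--                         ind.append([i0,i1,i2,i3])
--         for i0 in s0:
--             for i1 in s0:
--                 for i2 in s0:
--                     for i3 in s0:
--                         s.append([i0,i1,i2,i3])
--     else:
--         raise ValueError(f"Noe written k={k}")
--     return ind, s
-- ===== SOURCE B (Python) =====
-- def indsAndShifts(dim=3, k=2):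
--     # General recursive enumeration: lexicographic k-combinations of range(dim)
--     # and the k-fold sign product, instead of a per-k ladder of nested loops.
--     def combs(lo, r):
--         if r == 0:
--             return [[]]
--         return [[i] + rest for i in range(lo, dim) for rest in combs(i + 1, r - 1)]
--
--     def signs(r):
--         if r == 0:
--             return [[]]
--         return [[v] + rest for v in (-1, 1) for rest in signs(r - 1)]
--
--     return combs(0, k), signs(k)
-- ===== Notes on version B (the rewrite author's own statement) =====
-- stated objective: simpler
-- what changed: The per-k ladder of 1-to-4 hard-coded nested-loop blocks is replaced by one general recursive enumerator for lexicographic k-combinations of range(dim) and one for the k-fold sign product; Pre_ is k in {1,2,3,4}, exactly where A returns (A raises ValueError otherwise).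
import Mathlib
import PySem

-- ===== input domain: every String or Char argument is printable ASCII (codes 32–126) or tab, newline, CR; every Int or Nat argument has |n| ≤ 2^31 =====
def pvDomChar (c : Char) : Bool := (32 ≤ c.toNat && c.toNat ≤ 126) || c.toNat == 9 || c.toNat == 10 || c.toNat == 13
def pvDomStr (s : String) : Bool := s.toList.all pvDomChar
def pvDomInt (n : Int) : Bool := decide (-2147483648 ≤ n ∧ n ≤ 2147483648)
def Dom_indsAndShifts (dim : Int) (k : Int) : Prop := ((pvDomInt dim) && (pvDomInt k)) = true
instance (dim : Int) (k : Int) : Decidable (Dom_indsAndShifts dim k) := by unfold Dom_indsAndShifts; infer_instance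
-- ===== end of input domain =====

-- B replaces A's per-k ladder of hard-coded nested loops (k = 1..4) by one general recursive
-- enumerator for lexicographic k-combinations and one for the k-fold sign product (objective: simpler).

-- ===== PORT A =====
-- Literal transliteration: each `for … append` loop is a foldl accumulating appends;
-- the final `else: raise ValueError` branch is excluded by Pre_ (the value there is arbitrary).
def indsAndShifts (dim : Int) (k : Int) : List (List Int) × List (List Int) :=
  let s0 : List Int := [-1, 1]
  if k = 1 then
    let ind := (PySem.List.pyRange 0 dim 1).foldl (fun acc i0 => acc ++ [[i0]]) []
    let s := s0.foldl (fun acc i0 => acc ++ [[i0]]) []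
    (ind, s)
  else if k = 2 then
    let ind := (PySem.List.pyRange 0 dim 1).foldl (fun acc i0 =>
      (PySem.List.pyRange (i0+1) dim 1).foldl (fun acc i1 => acc ++ [[i0, i1]]) acc) []
    let s := s0.foldl (fun acc i0 => s0.foldl (fun acc i1 => acc ++ [[i0, i1]]) acc) []
    (ind, s)
  else if k = 3 then
    let ind := (PySem.List.pyRange 0 dim 1).foldl (fun acc i0 =>
      (PySem.List.pyRange (i0+1) dim 1).foldl (fun acc i1 =>
        (PySem.List.pyRange (i1+1) dim 1).foldl (fun acc i2 => acc ++ [[i0, i1, i2]]) acc) acc) []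
    let s := s0.foldl (fun acc i0 => s0.foldl (fun acc i1 =>
      s0.foldl (fun acc i2 => acc ++ [[i0, i1, i2]]) acc) acc) []
    (ind, s)
  else if k = 4 then
    let ind := (PySem.List.pyRange 0 dim 1).foldl (fun acc i0 =>
      (PySem.List.pyRange (i0+1) dim 1).foldl (fun acc i1 =>
        (PySem.List.pyRange (i1+1) dim 1).foldl (fun acc i2 =>
          (PySem.List.pyRange (i2+1) dim 1).foldl (fun acc i3 => acc ++ [[i0, i1, i2, i3]]) acc) acc) acc) []
    let s := s0.foldl (fun acc i0 => s0.foldl (fun acc i1 => s0.foldl (fun acc i2 =>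
      s0.foldl (fun acc i3 => acc ++ [[i0, i1, i2, i3]]) acc) acc) acc) []
    (ind, s)
  else
    ([], [])  -- Python raises ValueError here; outside Pre_

-- ===== PORT B =====
-- combs(lo, r): lexicographic r-combinations of range(lo, dim) (Source B's inner recursion).
def combsB (dim : Int) (lo : Int) : Nat → List (List Int)
  | 0 => [[]]
  | r + 1 => (PySem.List.pyRange lo dim 1).flatMap (fun i => (combsB dim (i + 1) r).map (i :: ·))
  decreasing_by exact Nat.lt_succ_self r

-- signs(r): the r-fold product of (-1, 1) (Source B's second recursion).
def signsB : Nat → List (List Int)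
  | 0 => [[]]
  | r + 1 => ([-1, 1] : List Int).flatMap (fun v => (signsB r).map (v :: ·))

-- In Python B, a negative k makes the recursions fail to return (RecursionError on the sign
-- side); such k are outside Pre_, so `k.toNat` is used for the recursion depth.
def indsAndShifts_alt (dim : Int) (k : Int) : List (List Int) × List (List Int) :=
  (combsB dim 0 k.toNat, signsB k.toNat)

-- ===== PRECONDITION & SPEC =====
-- Exactly the inputs on which A returns: for any other k A raises ValueError.
def Pre_indsAndShifts (dim : Int) (k : Int) : Prop := k = 1 ∨ k = 2 ∨ k = 3 ∨ k = 4
instance (dim : Int) (k : Int) : Decidable (Pre_indsAndShifts dim k) := by unfold Pre_indsAndShifts; infer_instance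
def pvWitness_indsAndShifts : Int × Int := (3, 2)

def Spec_indsAndShifts (dim : Int) (k : Int) (out : List (List Int) × List (List Int)) : Prop := out = indsAndShifts_alt dim k
instance (dim : Int) (k : Int) (out : List (List Int) × List (List Int)) : Decidable (Spec_indsAndShifts dim k out) := by unfold Spec_indsAndShifts; infer_instance

-- ===== CLAIM (what is proved, stated in full; the proofs are below) =====
def Claim_equal_indsAndShifts : Prop := ∀ (dim : Int) (k : Int), Dom_indsAndShifts dim k → Pre_indsAndShifts dim k → Spec_indsAndShifts dim k (indsAndShifts dim k)

-- ===== LEMMAS AND PROOFS =====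

theorem combsB_zero (dim lo : Int) : combsB dim lo 0 = [[]] := by simp [combsB]

theorem combsB_succ (dim lo : Int) (r : Nat) :
    combsB dim lo (r + 1) =
      (PySem.List.pyRange lo dim 1).flatMap (fun i => (combsB dim (i + 1) r).map (i :: ·)) := by
  simp [combsB]

theorem indA_one (dim : Int) :
    (PySem.List.pyRange 0 dim 1).foldl (fun acc i0 => acc ++ [[i0]]) ([] : List (List Int)) =
      combsB dim 0 1 := by
  simp [combsB_succ, combsB_zero, List.flatMap_def]

theorem indA_two (dim : Int) :
    (PySem.List.pyRange 0 dim 1).foldl (fun acc i0 =>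
      (PySem.List.pyRange (i0+1) dim 1).foldl (fun acc i1 => acc ++ [[i0, i1]]) acc)
      ([] : List (List Int)) = combsB dim 0 2 := by
  simp [combsB_succ, combsB_zero, List.flatMap_def, List.map_map, Function.comp_def]

theorem indA_three (dim : Int) :
    (PySem.List.pyRange 0 dim 1).foldl (fun acc i0 =>
      (PySem.List.pyRange (i0+1) dim 1).foldl (fun acc i1 =>
        (PySem.List.pyRange (i1+1) dim 1).foldl (fun acc i2 => acc ++ [[i0, i1, i2]]) acc) acc)
      ([] : List (List Int)) = combsB dim 0 3 := by
  simp [combsB_succ, combsB_zero, List.flatMap_def, List.map_map, Function.comp_def]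

theorem indA_four (dim : Int) :
    (PySem.List.pyRange 0 dim 1).foldl (fun acc i0 =>
      (PySem.List.pyRange (i0+1) dim 1).foldl (fun acc i1 =>
        (PySem.List.pyRange (i1+1) dim 1).foldl (fun acc i2 =>
          (PySem.List.pyRange (i2+1) dim 1).foldl (fun acc i3 => acc ++ [[i0, i1, i2, i3]]) acc) acc) acc)
      ([] : List (List Int)) = combsB dim 0 4 := by
  simp [combsB_succ, combsB_zero, List.flatMap_def, List.map_map, Function.comp_def]

theorem sA_one :
    (([-1, 1] : List Int).foldl (fun acc i0 => acc ++ [[i0]]) []) = signsB 1 := by decide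

theorem sA_two :
    (([-1, 1] : List Int).foldl (fun acc i0 =>
      ([-1, 1] : List Int).foldl (fun acc i1 => acc ++ [[i0, i1]]) acc) []) = signsB 2 := by decide

theorem sA_three :
    (([-1, 1] : List Int).foldl (fun acc i0 => ([-1, 1] : List Int).foldl (fun acc i1 =>
      ([-1, 1] : List Int).foldl (fun acc i2 => acc ++ [[i0, i1, i2]]) acc) acc) []) = signsB 3 := by decide

theorem sA_four :
    (([-1, 1] : List Int).foldl (fun acc i0 => ([-1, 1] : List Int).foldl (fun acc i1 =>
      ([-1, 1] : List Int).foldl (fun acc i2 =>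
        ([-1, 1] : List Int).foldl (fun acc i3 => acc ++ [[i0, i1, i2, i3]]) acc) acc) acc) []) = signsB 4 := by decide

-- ===== VERDICT (by name: the statement is the Claim_ definition above) =====
theorem indsAndShifts_spec : Claim_equal_indsAndShifts := by
  intro dim k _ hpre
  unfold Spec_indsAndShifts indsAndShifts indsAndShifts_alt
  rcases hpre with h | h | h | h <;> subst h
  · exact Prod.ext_iff.mpr ⟨indA_one dim, sA_one⟩
  · exact Prod.ext_iff.mpr ⟨indA_two dim, sA_two⟩
  · exact Prod.ext_iff.mpr ⟨indA_three dim, sA_three⟩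
  · exact Prod.ext_iff.mpr ⟨indA_four dim, sA_four⟩
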